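-- pv_equiv track=rewrite | github.com/huyentrang1611/BT2_LTCB | scr/btap.py | first_repeated_char_min_index
-- ===== SOURCE A (Python) =====
-- def first_repeated_char_min_index(s):
--     index = {}
--     min_index = len(s)
--     repeated_char = None
--     for i, ch in enumerate(s):
--         if ch in index:
--             if index[ch] < min_index:
--                 min_index = index[ch]
--                 repeated_char = ch
--         else:
--             index[ch] = i
--     return repeated_char
-- ===== SOURCE B (Python) =====
-- def first_repeated_char_min_index(s):
--     counts = {}
--     for ch in s:
--         counts[ch] = counts.get(ch, 0) + 1
--     for ch in s:
--         if counts[ch] > 1: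
--             return ch
--     return None
-- ===== Notes on version B (the rewrite author's own statement) =====
-- stated objective: simpler
-- what changed: Replaces A's single pass with running-minimum/first-index bookkeeping by a two-phase decomposition: build a frequency table, then return the first character of s whose count exceeds 1 (the first such character in scan order is exactly the repeated character with the minimal first-occurrence index).
import Mathlib
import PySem

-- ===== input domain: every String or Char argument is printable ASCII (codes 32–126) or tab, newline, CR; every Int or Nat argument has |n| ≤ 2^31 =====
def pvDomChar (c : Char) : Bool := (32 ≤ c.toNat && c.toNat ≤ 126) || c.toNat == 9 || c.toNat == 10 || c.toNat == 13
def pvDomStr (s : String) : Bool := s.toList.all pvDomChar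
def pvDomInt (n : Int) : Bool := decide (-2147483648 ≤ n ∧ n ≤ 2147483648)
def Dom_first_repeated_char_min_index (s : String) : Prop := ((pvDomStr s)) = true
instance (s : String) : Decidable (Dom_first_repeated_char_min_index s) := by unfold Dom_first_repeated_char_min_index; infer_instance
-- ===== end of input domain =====

-- B replaces A's single-pass running-minimum bookkeeping by a two-phase count-then-scan
-- decomposition (objective: simpler); return values are proved equal on all of Dom.

-- ===== PORT A =====
-- the for-loop over enumerate(s): i is the running index, state = (index dict, min_index, repeated_char)
def pvLoopA : List Char → Int → PySem.Dict Char Int → Int → Option Char → Option Char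
  | [], _, _, _, r => r
  | ch :: t, i, d, m, r =>
    match d.get? ch with
    | some j => if j < m then pvLoopA t (i + 1) d j (some ch) else pvLoopA t (i + 1) d m r
    | none => pvLoopA t (i + 1) (d.insert ch i) m r

def first_repeated_char_min_index (s : String) : Option String :=
  (pvLoopA s.toList 0 PySem.Dict.empty (s.toList.length : Int) none).map
    (fun c => String.mk [c])

-- ===== PORT B =====
def first_repeated_char_min_index_alt (s : String) : Option String :=
  let counts : PySem.Dict Char Int :=
    s.toList.foldl (fun d ch => d.insert ch (d.getD ch 0 + 1)) PySem.Dict.empty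
  -- the second loop with early return: first ch of s with counts[ch] > 1
  -- (ch is always a key of counts, so counts[ch] never raises; getD is exact here)
  (s.toList.find? (fun ch => counts.getD ch 0 > 1)).map (fun c => String.mk [c])

-- ===== PRECONDITION & SPEC =====
def Spec_first_repeated_char_min_index (s : String) (out : Option String) : Prop := out = first_repeated_char_min_index_alt s
instance (s : String) (out : Option String) : Decidable (Spec_first_repeated_char_min_index s out) := by unfold Spec_first_repeated_char_min_index; infer_instance

-- ===== CLAIM (what is proved, stated in full; the proofs are below) =====
def Claim_equal_first_repeated_char_min_index : Prop := ∀ (s : String), Dom_first_repeated_char_min_index s → Spec_first_repeated_char_min_index s (first_repeated_char_min_index s)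

-- ===== LEMMAS AND PROOFS =====

-- the first character of l (in scan order) that occurs more than once in l
def pvDup (l : List Char) : Option Char := l.find? (fun x => 1 < l.count x)

-- find? only looks at the membership of its predicate
theorem pv_find?_congr_mem {f g : Char → Bool} :
    ∀ (l : List Char), (∀ x ∈ l, f x = g x) → l.find? f = l.find? g := by
  intro l
  induction l with
  | nil => intro _; rfl
  | cons a t ih =>
    intro h
    have ha := h a (List.mem_cons_self)
    simp only [List.find?, ha]
    cases g a with
    | true => rfl
    | false => exact ih (fun x hx => h x (List.mem_cons_of_mem _ hx))

theorem pv_find?_beq_self (ch : Char) :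
    ∀ (l : List Char), ch ∈ l → l.find? (fun x => x == ch) = some ch := by
  intro l
  induction l with
  | nil => intro h; cases h
  | cons a t ih =>
    intro h
    by_cases hac : a = ch
    · subst hac; simp [List.find?]
    · have : ch ∈ t := by
        rcases List.mem_cons.1 h with h' | h'
        · exact absurd h'.symm hac
        · exact h'
      have hb : (a == ch) = false := by simpa using hac
      simp only [List.find?, hb]
      exact ih this

-- CORE: adding "or x == ch" to the predicate of a successful find? picks whichever of
-- ch / the found element occurs first
theorem pv_find?_or_beq (f : Char → Bool) (ch c : Char) :
    ∀ (l : List Char), ch ∈ l → l.find? f = some c →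
      l.find? (fun x => f x || x == ch) =
        if l.idxOf ch < l.idxOf c then some ch else some c := by
  intro l
  induction l with
  | nil => intro h; cases h
  | cons a t ih =>
    intro hmem hfind
    by_cases hfa : f a = true
    · -- found at the head: c = a, idxOf c = 0
      have hc : c = a := by
        have : a = c := by simpa [List.find?, hfa] using hfind
        exact this.symm
      subst hc
      simp [List.find?, hfa, List.idxOf_cons_self]
    · have hfind' : t.find? f = some c := by simpa [List.find?, hfa] using hfind
      have hca : c ≠ a := by
        intro h; exact hfa (h ▸ List.find?_some hfind')
      by_cases hach : a = ch
      · -- head is ch: ch wins (c occurs strictly later)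
        subst hach
        have h1 : List.idxOf a (a :: t) = 0 := List.idxOf_cons_self
        have h2 : List.idxOf c (a :: t) = (List.idxOf c t).succ :=
          List.idxOf_cons_ne _ (fun h => hca h.symm)
        simp [List.find?, h1, h2]
      · have hmem' : ch ∈ t := by
          rcases List.mem_cons.1 hmem with h' | h'
          · exact absurd h'.symm hach
          · exact h'
        have h1 : List.idxOf ch (a :: t) = (List.idxOf ch t).succ :=
          List.idxOf_cons_ne _ hach
        have h2 : List.idxOf c (a :: t) = (List.idxOf c t).succ :=
          List.idxOf_cons_ne _ (fun h => hca h.symm)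
        have := ih hmem' hfind'
        simp only [List.find?, hfa, Bool.false_or, h1, h2]
        have hach' : (a == ch) = false := by simpa using hach
        rw [hach']
        rw [this]
        by_cases hlt : List.idxOf ch t < List.idxOf c t
        · rw [if_pos hlt, if_pos (by omega)]
        · rw [if_neg hlt, if_neg (by omega)]

-- count over a snoc
theorem pv_count_snoc (l : List Char) (ch x : Char) :
    (l ++ [ch]).count x = l.count x + (if x = ch then 1 else 0) := by
  by_cases h : x = ch
  · subst h; simp [List.count_append]
  · have h' : ¬ch = x := fun hh => h hh.symm
    simp [List.count_append, h, h']

-- DUP1: appending a fresh character does not change the first duplicate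
theorem pv_dup_snoc_notMem (l : List Char) (ch : Char) (h : ch ∉ l) :
    pvDup (l ++ [ch]) = pvDup l := by
  unfold pvDup
  have hcongr : (l ++ [ch]).find? (fun x => decide (1 < (l ++ [ch]).count x)) =
      (l ++ [ch]).find? (fun x => decide (1 < l.count x)) := by
    apply pv_find?_congr_mem
    intro x hx
    rcases List.mem_append.1 hx with hx | hx
    · have hne : x ≠ ch := fun hh => h (hh ▸ hx)
      rw [pv_count_snoc, if_neg hne]
      simp
    · have hx : x = ch := by simpa using hx
      subst hx
      have h0 : l.count x = 0 := List.count_eq_zero.2 h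
      rw [pv_count_snoc, if_pos rfl, h0]
      rfl
  rw [hcongr, List.find?_append]
  have hsingle : ([ch]).find? (fun x => decide (1 < l.count x)) = none := by
    have h0 : l.count ch = 0 := List.count_eq_zero.2 h
    simp [List.find?, h0]
  rw [hsingle, Option.or_none]

-- DUP2: appending a second occurrence when there was no duplicate yet
theorem pv_dup_snoc_mem_none (l : List Char) (ch : Char) (hm : ch ∈ l)
    (hd : pvDup l = none) : pvDup (l ++ [ch]) = some ch := by
  unfold pvDup
  have hle : ∀ x ∈ l, l.count x ≤ 1 := by
    intro x hx
    have := (List.find?_eq_none.1 hd) x hx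
    simpa using this
  have hcongr : (l ++ [ch]).find? (fun x => decide (1 < (l ++ [ch]).count x)) =
      (l ++ [ch]).find? (fun x => x == ch) := by
    apply pv_find?_congr_mem
    intro x hx
    by_cases hxc : x = ch
    · subst hxc
      have h1 : 1 ≤ l.count x := List.count_pos_iff.2 hm
      rw [pv_count_snoc, if_pos rfl]
      simp
      omega
    · have hxl : x ∈ l := by
        rcases List.mem_append.1 hx with hx | hx
        · exact hx
        · exact absurd (by simpa using hx) hxc
      rw [pv_count_snoc, if_neg hxc]
      have := hle x hxl
      have hb : (x == ch) = false := by simpa using hxc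
      rw [hb]
      simp
      omega
  rw [hcongr]
  exact pv_find?_beq_self ch _ (List.mem_append.2 (Or.inl hm))

-- DUP3: appending a repeat when a duplicate already exists: first occurrences compete
theorem pv_dup_snoc_mem_some (l : List Char) (ch c : Char) (hm : ch ∈ l)
    (hd : pvDup l = some c) :
    pvDup (l ++ [ch]) = if l.idxOf ch < l.idxOf c then some ch else some c := by
  unfold pvDup
  have hcongr : (l ++ [ch]).find? (fun x => decide (1 < (l ++ [ch]).count x)) =
      (l ++ [ch]).find? (fun x => decide (1 < l.count x) || x == ch) := by
    apply pv_find?_congr_mem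
    intro x hx
    by_cases hxc : x = ch
    · subst hxc
      have h1 : 1 ≤ l.count x := List.count_pos_iff.2 hm
      rw [pv_count_snoc, if_pos rfl]
      simp
      omega
    · have hb : (x == ch) = false := by simpa using hxc
      rw [pv_count_snoc, if_neg hxc, hb]
      simp
  rw [hcongr, List.find?_append]
  have hfl := pv_find?_or_beq (fun x => decide (1 < l.count x)) ch c l hm hd
  rw [hfl]
  by_cases hlt : l.idxOf ch < l.idxOf c <;> simp [hlt]

-- the loop invariant: after processing the prefix p, d holds first indices of p, and
-- (m, r) describe pvDup p; processing the suffix t then yields pvDup (p ++ t)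
theorem pv_loopA_spec :
    ∀ (t p : List Char) (d : PySem.Dict Char Int) (m : Int) (r : Option Char) (L : Nat),
      L = p.length + t.length →
      (∀ x, d.get? x = if x ∈ p then some (p.idxOf x : Int) else none) →
      (match pvDup p with
        | none => m = (L : Int) ∧ r = none
        | some c => m = (p.idxOf c : Int) ∧ r = some c) →
      pvLoopA t (p.length : Int) d m r = pvDup (p ++ t) := by
  intro t
  induction t with
  | nil =>
    intro p d m r L _ _ hmr
    simp only [pvLoopA, List.append_nil]
    cases hc : pvDup p with
    | none => rw [hc] at hmr; exact hmr.2
    | some c => rw [hc] at hmr; exact hmr.2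
  | cons ch t' ih =>
    intro p d m r L hL hd hmr
    have hstep : pvLoopA (ch :: t') (p.length : Int) d m r =
        match d.get? ch with
        | some j => if j < m then pvLoopA t' ((p.length : Int) + 1) d j (some ch)
                    else pvLoopA t' ((p.length : Int) + 1) d m r
        | none => pvLoopA t' ((p.length : Int) + 1) (d.insert ch (p.length : Int)) m r := rfl
    have hlen : ((p.length : Int) + 1) = (((p ++ [ch]).length : Nat) : Int) := by
      simp
    have hassoc : p ++ ch :: t' = (p ++ [ch]) ++ t' := by simp
    by_cases hmem : ch ∈ p
    · -- ch already seen: d.get? ch = some (idxOf ch p)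
      have hget : d.get? ch = some ((p.idxOf ch : Nat) : Int) := by rw [hd ch, if_pos hmem]
      have hidx_lt : p.idxOf ch < p.length := List.idxOf_lt_length_of_mem hmem
      have hd' : ∀ x, d.get? x =
          if x ∈ (p ++ [ch]) then some (((p ++ [ch]).idxOf x : Nat) : Int) else none := by
        intro x
        rw [hd x]
        by_cases hx : x ∈ p
        · rw [if_pos hx, if_pos (List.mem_append.2 (Or.inl hx)), List.idxOf_append_of_mem hx]
        · have hx' : x ∉ p ++ [ch] ∨ x = ch := by
            by_cases hxc : x = ch
            · exact Or.inr hxc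
            · exact Or.inl (by
                intro hmem'
                rcases List.mem_append.1 hmem' with h' | h'
                · exact hx h'
                · exact hxc (by simpa using h'))
          rcases hx' with hx' | hx'
          · rw [if_neg hx, if_neg hx']
          · subst hx'
            exact absurd hmem hx
      have hstep2 : pvLoopA (ch :: t') (p.length : Int) d m r =
          if ((p.idxOf ch : Nat) : Int) < m
          then pvLoopA t' ((p.length : Int) + 1) d ((p.idxOf ch : Nat) : Int) (some ch)
          else pvLoopA t' ((p.length : Int) + 1) d m r := by
        rw [hstep, hget]
      rw [hstep2]
      cases hdup : pvDup p with
      | none =>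
        -- no duplicate yet: idxOf ch < L = m, so the running minimum is set
        rw [hdup] at hmr
        obtain ⟨hmL, hrn⟩ := hmr
        have hlt : ((p.idxOf ch : Nat) : Int) < m := by
          rw [hmL]; subst hL; push_cast; omega
        rw [if_pos hlt, hlen, hassoc]
        apply ih (p ++ [ch]) d _ _ L
        · simp at hL ⊢; omega
        · exact hd'
        · rw [pv_dup_snoc_mem_none p ch hmem hdup]
          exact ⟨by rw [List.idxOf_append_of_mem hmem], rfl⟩
      | some c =>
        rw [hdup] at hmr
        obtain ⟨hmc, hrc⟩ := hmr
        have hcp : c ∈ p := List.mem_of_find?_eq_some hdup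
        have hsnoc := pv_dup_snoc_mem_some p ch c hmem hdup
        by_cases hlt : p.idxOf ch < p.idxOf c
        · have hlt' : ((p.idxOf ch : Nat) : Int) < m := by rw [hmc]; exact_mod_cast hlt
          rw [if_pos hlt', hlen, hassoc]
          apply ih (p ++ [ch]) d _ _ L
          · simp at hL ⊢; omega
          · exact hd'
          · rw [hsnoc, if_pos hlt]
            exact ⟨by rw [List.idxOf_append_of_mem hmem], rfl⟩
        · have hlt' : ¬ ((p.idxOf ch : Nat) : Int) < m := by
            rw [hmc]; intro hcon; exact hlt (by exact_mod_cast hcon)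
          rw [if_neg hlt', hlen, hassoc]
          apply ih (p ++ [ch]) d _ _ L
          · simp at hL ⊢; omega
          · exact hd'
          · rw [hsnoc, if_neg hlt]
            exact ⟨by rw [List.idxOf_append_of_mem hcp]; exact hmc, by rw [hrc]⟩
    · -- fresh character: inserted with index p.length
      have hget : d.get? ch = none := by rw [hd ch, if_neg hmem]
      rw [hstep, hget]
      rw [hlen, hassoc]
      apply ih (p ++ [ch]) _ m r L
      · simp at hL ⊢; omega
      · intro x
        rw [PySem.Dict.get?_insert]
        by_cases hxc : x = ch
        · subst hxc
          rw [if_pos rfl, if_pos (List.mem_append.2 (Or.inr (by simp)))]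
          rw [List.idxOf_append_of_notMem hmem]
          simp
        · rw [if_neg hxc, hd x]
          by_cases hx : x ∈ p
          · rw [if_pos hx, if_pos (List.mem_append.2 (Or.inl hx)), List.idxOf_append_of_mem hx]
          · rw [if_neg hx, if_neg (by
              intro hmem'
              rcases List.mem_append.1 hmem' with h' | h'
              · exact hx h'
              · exact hxc (by simpa using h'))]
      · rw [pv_dup_snoc_notMem p ch hmem]
        cases hdup : pvDup p with
        | none => rw [hdup] at hmr; exact hmr
        | some c =>
          rw [hdup] at hmr
          have hc : c ∈ p := List.mem_of_find?_eq_some hdup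
          exact ⟨by rw [List.idxOf_append_of_mem hc]; exact hmr.1, hmr.2⟩

theorem pv_counts_pred (l : List Char) (x : Char) :
    ((l.foldl (fun d ch => d.insert ch (d.getD ch 0 + 1)) (PySem.Dict.empty : PySem.Dict Char Int)).getD x 0) =
      (l.count x : Int) := by
  rw [PySem.Dict.foldl_insert_getD_add_one_eq_counter l, PySem.Dict.getD_counter]

-- ===== VERDICT (by name: the statement is the Claim_ definition above) =====
theorem first_repeated_char_min_index_spec : Claim_equal_first_repeated_char_min_index := by
  intro s _
  unfold Spec_first_repeated_char_min_index
  have hA : pvLoopA s.toList 0 PySem.Dict.empty (s.toList.length : Int) none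
      = pvDup s.toList := by
    have := pv_loopA_spec s.toList [] PySem.Dict.empty (s.toList.length : Int) none
      s.toList.length (by simp) (by intro x; simp [PySem.Dict.get?_empty]) (by simp [pvDup])
    simpa using this
  have hB : s.toList.find?
      (fun ch => decide ((s.toList.foldl (fun d ch => d.insert ch (d.getD ch 0 + 1)) (PySem.Dict.empty : PySem.Dict Char Int)).getD ch 0 > 1))
      = pvDup s.toList := by
    unfold pvDup
    apply pv_find?_congr_mem s.toList
    intro x _
    rw [decide_eq_decide, gt_iff_lt, pv_counts_pred s.toList x]
    simp
  show (pvLoopA s.toList 0 PySem.Dict.empty (s.toList.length : Int) none).map (fun c => String.mk [c])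
      = (s.toList.find? (fun ch => decide ((s.toList.foldl (fun d ch => d.insert ch (d.getD ch 0 + 1)) (PySem.Dict.empty : PySem.Dict Char Int)).getD ch 0 > 1))).map (fun c => String.mk [c])
  rw [hA, hB]
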